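-- pv_equiv track=rewrite | github.com/sk-tech24/GenAIProductDesc | new_app.py | fallback_generation
-- ===== SOURCE A (Python) =====
-- def fallback_generation(prompt: str) -> str:
--     """Fallback content generation when APIs are unavailable"""
--     # Extract key information from prompt
--     lines = prompt.split('\n')
--     product_info = {}
--
--     for line in lines:
--         if 'Product Name:' in line:
--             product_info['name'] = line.split('Product Name:')[1].strip()
--         elif 'Primary Keywords:' in line:
--             product_info['primary'] = line.split('Primary Keywords:')[1].strip()
--         elif 'Secondary Keywords:' in line:
--             product_info['secondary'] = line.split('Secondary Keywords:')[1].strip()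
--
--     # Generate basic content
--     name = product_info.get('name', 'Product')
--     primary = product_info.get('primary', '').split(',')[0].strip()
--
--     return f"Based on the available information about {name}, this {primary} offers professional-grade quality and effectiveness. The product is designed to address specific needs while providing reliable results. Users can expect consistent performance and satisfaction from this carefully formulated solution."
-- ===== SOURCE B (Python) =====
-- def fallback_generation(prompt: str) -> str:
--     """Fallback content generation when APIs are unavailable"""
--     lines = prompt.split('\n')
--
--     # last occurrence wins: scan from the end, stop at the first hit per field
--     name = 'Product'
--     for line in reversed(lines):
--         if 'Product Name:' in line:
--             name = line.split('Product Name:')[1].strip()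
--             break
--
--     primary = ''
--     for line in reversed(lines):
--         if 'Primary Keywords:' in line:
--             primary = line.split('Primary Keywords:')[1].strip()
--             break
--     primary = primary.split(',')[0].strip()
--
--     return f"Based on the available information about {name}, this {primary} offers professional-grade quality and effectiveness. The product is designed to address specific needs while providing reliable results. Users can expect consistent performance and satisfaction from this carefully formulated solution."
-- ===== Notes on version B (the rewrite author's own statement) =====
-- stated objective: simpler
-- what changed: Replaces the forward pass with an if/elif chain filling a dict (last line wins) by one reverse scan per used field that stops at the first matching line; Pre_ excludes prompts with a line containing both the 'Product Name:' and 'Primary Keywords:' markers, where A's elif precedence assigns the line to the name field only while B extracts each field independently - both readings of such a malformed line are defensible.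
import Mathlib
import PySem

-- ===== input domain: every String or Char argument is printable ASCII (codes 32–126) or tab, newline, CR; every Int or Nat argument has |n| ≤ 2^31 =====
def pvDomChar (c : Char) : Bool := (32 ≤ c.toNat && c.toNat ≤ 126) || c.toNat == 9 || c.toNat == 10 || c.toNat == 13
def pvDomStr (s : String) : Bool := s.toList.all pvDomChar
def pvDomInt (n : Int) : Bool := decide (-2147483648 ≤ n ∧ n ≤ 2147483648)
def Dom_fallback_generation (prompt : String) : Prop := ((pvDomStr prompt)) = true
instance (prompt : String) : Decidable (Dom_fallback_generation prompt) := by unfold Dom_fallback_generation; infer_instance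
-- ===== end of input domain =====

-- B replaces A's single forward pass (if/elif chain filling a dict, last line wins) by one
-- reverse scan per used field that stops at the first hit; same return value on Pre_.

-- ===== PORT A =====

-- s.split(sep) with the literal nonempty separators used below (split? is none only for sep = "")
def fbSplit (s sep : String) : List String := (PySem.Str.split? s sep).getD []

-- one iteration of A's 'for line in lines' loop body (the if/elif/elif chain)
def fbStep (d : PySem.Dict String String) (line : String) : PySem.Dict String String :=
  if PySem.Str.isIn "Product Name:" line then
    d.insert "name" (PySem.Str.strip ((PySem.List.pyGet? (fbSplit line "Product Name:") 1).getD ""))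
  else if PySem.Str.isIn "Primary Keywords:" line then
    d.insert "primary" (PySem.Str.strip ((PySem.List.pyGet? (fbSplit line "Primary Keywords:") 1).getD ""))
  else if PySem.Str.isIn "Secondary Keywords:" line then
    d.insert "secondary" (PySem.Str.strip ((PySem.List.pyGet? (fbSplit line "Secondary Keywords:") 1).getD ""))
  else d

def fallback_generation (prompt : String) : String :=
  let lines := fbSplit prompt "\n"
  let product_info := lines.foldl fbStep PySem.Dict.empty
  let name := product_info.getD "name" "Product"
  let primary := PySem.Str.strip ((PySem.List.pyGet? (fbSplit (product_info.getD "primary" "") ",") 0).getD "")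
  "Based on the available information about " ++ name ++ ", this " ++ primary ++ " offers professional-grade quality and effectiveness. The product is designed to address specific needs while providing reliable results. Users can expect consistent performance and satisfaction from this carefully formulated solution."

-- ===== PORT B =====

-- B's 'for line in reversed(lines): if p(line): … break' loop: first hit in the reversed list
def fbRevFind (p : String → Bool) : List String → Option String
  | [] => none
  | l :: ls => if p l then some l else fbRevFind p ls

def fallback_generation_alt (prompt : String) : String :=
  let lines := fbSplit prompt "\n"
  let name :=
    match fbRevFind (fun l => PySem.Str.isIn "Product Name:" l) lines.reverse with
    | some l => PySem.Str.strip ((PySem.List.pyGet? (fbSplit l "Product Name:") 1).getD "")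
    | none => "Product"
  let primaryRaw :=
    match fbRevFind (fun l => PySem.Str.isIn "Primary Keywords:" l) lines.reverse with
    | some l => PySem.Str.strip ((PySem.List.pyGet? (fbSplit l "Primary Keywords:") 1).getD "")
    | none => ""
  let primary := PySem.Str.strip ((PySem.List.pyGet? (fbSplit primaryRaw ",") 0).getD "")
  "Based on the available information about " ++ name ++ ", this " ++ primary ++ " offers professional-grade quality and effectiveness. The product is designed to address specific needs while providing reliable results. Users can expect consistent performance and satisfaction from this carefully formulated solution."

-- ===== PRECONDITION & SPEC =====
-- Pre_ excludes prompts with a line containing both 'Product Name:' and 'Primary Keywords:':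
-- on such a malformed line A's elif precedence feeds it to the name field only, B's independent
-- per-field extraction also uses it for primary — either reading is defensible.
def Pre_fallback_generation (prompt : String) : Prop :=
  ∀ l ∈ fbSplit prompt "\n",
    ¬(PySem.Str.isIn "Product Name:" l = true ∧ PySem.Str.isIn "Primary Keywords:" l = true)
instance (prompt : String) : Decidable (Pre_fallback_generation prompt) := by
  unfold Pre_fallback_generation; infer_instance
def pvWitness_fallback_generation : String := "Product Name: Gel\nPrimary Keywords: soap, foam"
def Spec_fallback_generation (prompt : String) (out : String) : Prop := out = fallback_generation_alt prompt
instance (prompt : String) (out : String) : Decidable (Spec_fallback_generation prompt out) := by unfold Spec_fallback_generation; infer_instance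

-- ===== CLAIM (what is proved, stated in full; the proofs are below) =====
def Claim_equal_fallback_generation : Prop := ∀ (prompt : String), Dom_fallback_generation prompt → Pre_fallback_generation prompt → Spec_fallback_generation prompt (fallback_generation prompt)

-- ===== LEMMAS AND PROOFS =====

theorem fbRevFind_append (p : String → Bool) (xs ys : List String) :
    fbRevFind p (xs ++ ys) = (fbRevFind p xs).orElse (fun _ => fbRevFind p ys) := by
  induction xs with
  | nil => simp [fbRevFind]
  | cons a xs ih => simp only [List.cons_append, fbRevFind, ih]; split <;> simp

theorem fbRevFind_congr (p q : String → Bool) (ls : List String)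
    (h : ∀ l ∈ ls, p l = q l) : fbRevFind p ls = fbRevFind q ls := by
  induction ls with
  | nil => rfl
  | cons a ls ih =>
    simp only [fbRevFind, h a (List.mem_cons_self ..)]
    split <;> [rfl; exact ih fun l hl => h l (List.mem_cons_of_mem _ hl)]

theorem get?_fbStep_name (d : PySem.Dict String String) (a : String) :
    (fbStep d a).get? "name" =
      if PySem.Str.isIn "Product Name:" a then
        some (PySem.Str.strip ((PySem.List.pyGet? (fbSplit a "Product Name:") 1).getD ""))
      else d.get? "name" := by
  unfold fbStep; split_ifs <;> simp [PySem.Dict.get?_insert]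

theorem get?_fbStep_primary (d : PySem.Dict String String) (a : String) :
    (fbStep d a).get? "primary" =
      if PySem.Str.isIn "Primary Keywords:" a && !PySem.Str.isIn "Product Name:" a then
        some (PySem.Str.strip ((PySem.List.pyGet? (fbSplit a "Primary Keywords:") 1).getD ""))
      else d.get? "primary" := by
  unfold fbStep; split_ifs <;> simp_all [PySem.Dict.get?_insert]

theorem fold_get_name (rest : List String) (d : PySem.Dict String String) :
    (rest.foldl fbStep d).get? "name" =
      match fbRevFind (fun l => PySem.Str.isIn "Product Name:" l) rest.reverse with
      | some l => some (PySem.Str.strip ((PySem.List.pyGet? (fbSplit l "Product Name:") 1).getD ""))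
      | none => d.get? "name" := by
  induction rest generalizing d with
  | nil => simp [fbRevFind]
  | cons a rest ih =>
    rw [List.foldl_cons, ih, List.reverse_cons, fbRevFind_append]
    cases h : fbRevFind (fun l => PySem.Str.isIn "Product Name:" l) rest.reverse with
    | some l => simp [Option.orElse]
    | none => simp only [Option.orElse, fbRevFind, get?_fbStep_name]; split <;> simp

theorem fold_get_primary (rest : List String) (d : PySem.Dict String String) :
    (rest.foldl fbStep d).get? "primary" =
      match fbRevFind (fun l => PySem.Str.isIn "Primary Keywords:" l && !PySem.Str.isIn "Product Name:" l) rest.reverse with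
      | some l => some (PySem.Str.strip ((PySem.List.pyGet? (fbSplit l "Primary Keywords:") 1).getD ""))
      | none => d.get? "primary" := by
  induction rest generalizing d with
  | nil => simp [fbRevFind]
  | cons a rest ih =>
    rw [List.foldl_cons, ih, List.reverse_cons, fbRevFind_append]
    cases h : fbRevFind (fun l => PySem.Str.isIn "Primary Keywords:" l && !PySem.Str.isIn "Product Name:" l) rest.reverse with
    | some l => simp [Option.orElse]
    | none => simp only [Option.orElse, fbRevFind, get?_fbStep_primary]; split <;> simp

theorem fbOptMatch (o : Option String) (f : String → String) (dflt : String) :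
    Option.getD (match o with | some l => some (f l) | none => none) dflt
      = match o with | some l => f l | none => dflt := by cases o <;> rfl

-- ===== VERDICT (by name: the statement is the Claim_ definition above) =====
theorem fallback_generation_spec : Claim_equal_fallback_generation := by
  intro prompt _ hpre
  show fallback_generation prompt = fallback_generation_alt prompt
  have hc : fbRevFind (fun l => PySem.Str.isIn "Primary Keywords:" l && !PySem.Str.isIn "Product Name:" l) (fbSplit prompt "\n").reverse
      = fbRevFind (fun l => PySem.Str.isIn "Primary Keywords:" l) (fbSplit prompt "\n").reverse := by
    refine fbRevFind_congr _ _ _ fun l hl => ?_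
    have := hpre l (List.mem_reverse.mp hl)
    cases h1 : PySem.Str.isIn "Primary Keywords:" l <;>
      cases h2 : PySem.Str.isIn "Product Name:" l <;> simp_all
  simp only [fallback_generation, fallback_generation_alt,
    PySem.Dict.getD_eq_get?_getD, fold_get_name, fold_get_primary, hc,
    PySem.Dict.get?_empty, fbOptMatch]
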